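-- pv_equiv track=rewrite | github.com/Kamalep/challenge | Coderhub/Python/missingletter.py | missingletter
-- ===== SOURCE A (Python) =====
-- def missingletter(txt):
--     abc = 'abcdefghijklmnopqrstuvwxyz'
--     o = 'No Missing Letter'
--     part = abc[abc.index(txt[0]):abc.index(txt[-1]) + 1]
--     for c in part:
--         if c in txt:
--             pass
--         else:
--             return c
--     return o
-- ===== SOURCE B (Python) =====
-- def missingletter(txt):
--     abc = 'abcdefghijklmnopqrstuvwxyz'
--     part = abc[abc.index(txt[0]):abc.index(txt[-1]) + 1]
--     missing = set(part) - set(txt)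
--     return min(missing) if missing else 'No Missing Letter'
-- ===== Notes on version B (the rewrite author's own statement) =====
-- stated objective: simpler
-- what changed: replaces the scan-and-short-circuit loop over the candidate range with building the set difference set(part) - set(txt) and selecting its minimum
import Mathlib
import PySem

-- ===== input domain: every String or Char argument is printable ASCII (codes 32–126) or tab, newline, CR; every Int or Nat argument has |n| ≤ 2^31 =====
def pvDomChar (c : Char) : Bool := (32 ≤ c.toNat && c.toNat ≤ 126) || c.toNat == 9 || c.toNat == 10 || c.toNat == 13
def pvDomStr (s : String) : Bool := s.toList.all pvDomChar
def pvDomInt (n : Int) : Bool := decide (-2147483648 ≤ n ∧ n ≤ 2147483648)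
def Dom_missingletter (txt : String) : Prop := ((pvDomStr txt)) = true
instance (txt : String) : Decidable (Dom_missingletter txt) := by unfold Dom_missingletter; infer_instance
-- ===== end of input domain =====

-- B replaces A's first-absent-letter scan by set difference + minimum (objective: simpler).

-- ===== PORT A =====
-- A's for-loop with early return: first letter of part not contained in txt.
-- ('c in txt' with a single-char c is exactly char membership in txt's characters)
def pvLoopA : List Char → List Char → String
  | [], _ => "No Missing Letter"
  | c :: rest, t => if c ∈ t then pvLoopA rest t else String.ofList [c]

def missingletter (txt : String) : String :=
  match PySem.Str.pyGet? txt 0, PySem.Str.pyGet? txt (-1) with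
  | some c0, some c1 =>
    match PySem.List.index? "abcdefghijklmnopqrstuvwxyz".toList c0, PySem.List.index? "abcdefghijklmnopqrstuvwxyz".toList c1 with
    | some i, some j =>
      pvLoopA (PySem.List.slice "abcdefghijklmnopqrstuvwxyz".toList (some (i : Int)) (some ((j : Int) + 1))) txt.toList
    | _, _ => "No Missing Letter"   -- unreachable under Pre_ (ValueError in Python)
  | _, _ => "No Missing Letter"     -- unreachable under Pre_ (IndexError in Python)

-- ===== PORT B =====
def missingletter_alt (txt : String) : String :=
  match PySem.Str.pyGet? txt 0 with
  | none => "No Missing Letter"     -- unreachable under Pre_ (IndexError in Python)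
  | some c0 =>
  match PySem.Str.pyGet? txt (-1) with
  | none => "No Missing Letter"
  | some c1 =>
  match PySem.List.index? "abcdefghijklmnopqrstuvwxyz".toList c0 with
  | none => "No Missing Letter"     -- unreachable under Pre_ (ValueError in Python)
  | some i =>
  match PySem.List.index? "abcdefghijklmnopqrstuvwxyz".toList c1 with
  | none => "No Missing Letter"
  | some j =>
      let part := PySem.List.slice "abcdefghijklmnopqrstuvwxyz".toList (some (i : Int)) (some ((j : Int) + 1))
      let missing : PySem.Set Char :=
        PySem.Set.diff (PySem.Set.ofList part) (PySem.Set.ofList txt.toList)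
      match PySem.List.min? missing (fun c => c) with
      | some m => String.ofList [m]
      | none => "No Missing Letter"

-- ===== PRECONDITION & SPEC =====
-- Pre_ excludes exactly the inputs where A raises: the empty string (IndexError on txt[0]),
-- and strings whose first or last character is not a lowercase ASCII letter (ValueError in abc.index).
def Pre_missingletter (txt : String) : Prop :=
  txt.toList.head?.any (· ∈ "abcdefghijklmnopqrstuvwxyz".toList) = true ∧ txt.toList.getLast?.any (· ∈ "abcdefghijklmnopqrstuvwxyz".toList) = true
instance (txt : String) : Decidable (Pre_missingletter txt) := by
  unfold Pre_missingletter; infer_instance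

def pvWitness_missingletter : String := "abdf"

def Spec_missingletter (txt : String) (out : String) : Prop := out = missingletter_alt txt
instance (txt : String) (out : String) : Decidable (Spec_missingletter txt out) := by
  unfold Spec_missingletter; infer_instance

-- ===== CLAIM (what is proved, stated in full; the proofs are below) =====
def Claim_equal_missingletter : Prop :=
  ∀ (txt : String), Dom_missingletter txt → Pre_missingletter txt →
    Spec_missingletter txt (missingletter txt)

-- ===== LEMMAS AND PROOFS =====

theorem pvLoopA_eq_head_filter (part t : List Char) :
    pvLoopA part t =
      match (part.filter (fun c => !(c ∈ t : Bool))).head? with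
      | some c => String.ofList [c]
      | none => "No Missing Letter" := by
  induction part with
  | nil => rfl
  | cons c rest ih =>
    by_cases h : c ∈ t <;> simp [pvLoopA, h, ih]

theorem pvFoldlMin_pairwise {x : Char} {t : List Char}
    (h : (x :: t).Pairwise (· < ·)) : t.foldl min x = x := by
  induction t with
  | nil => rfl
  | cons y t' ih =>
    have hxy : x < y := (List.pairwise_cons.mp h).1 _ (List.mem_cons_self ..)
    have h' : (x :: t').Pairwise (· < ·) := h.sublist (by simp)
    simpa [min_eq_left hxy.le] using ih h'

theorem pvMin?_sorted (l : List Char) (h : l.Pairwise (· < ·)) :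
    PySem.List.min? l (fun c => c) = l.head? := by
  cases l with
  | nil => rfl
  | cons x t =>
    rw [PySem.List.min?_id_cons, pvFoldlMin_pairwise h]
    rfl

theorem pvDiff_eq_filter (s t : List Char) :
    PySem.Set.diff s t = s.filter (fun c => !(c ∈ t : Bool)) := by
  simp only [PySem.Set.diff, PySem.Set.contains, List.contains_eq_mem]

-- ===== VERDICT (by name: the statement is the Claim_ definition above) =====
theorem missingletter_spec : Claim_equal_missingletter := by
  intro txt _ hpre
  obtain ⟨h0, h1⟩ := hpre
  unfold Spec_missingletter missingletter missingletter_alt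
  cases hh : txt.toList.head? with
  | none => simp [hh] at h0
  | some c0 =>
  cases hl : txt.toList.getLast? with
  | none => simp [hl] at h1
  | some c1 =>
  rw [hh] at h0; rw [hl] at h1
  simp only [Option.any_some, decide_eq_true_eq] at h0 h1
  have hg0 : PySem.Str.pyGet? txt 0 = some c0 := by
    simp [PySem.Str.pyGet?_eq, PySem.Chars.pyGet?_eq_listPyGet?, PySem.List.pyGet?_zero,
      ← List.head?_eq_getElem?, hh]
  have hg1 : PySem.Str.pyGet? txt (-1) = some c1 := by
    simp [PySem.Str.pyGet?_eq, PySem.Chars.pyGet?_eq_listPyGet?, PySem.List.pyGet?_neg_one, hl]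
  obtain ⟨i, hi⟩ := Option.isSome_iff_exists.mp ((PySem.List.index?_isSome_iff "abcdefghijklmnopqrstuvwxyz".toList c0).mpr h0)
  obtain ⟨j, hj⟩ := Option.isSome_iff_exists.mp ((PySem.List.index?_isSome_iff "abcdefghijklmnopqrstuvwxyz".toList c1).mpr h1)
  rw [hg0, hg1]
  simp only [hi, hj]
  -- the candidate slice
  set part := PySem.List.slice "abcdefghijklmnopqrstuvwxyz".toList (some (i : Int)) (some ((j : Int) + 1)) with hpart
  have habc : "abcdefghijklmnopqrstuvwxyz".toList.Pairwise (· < ·) := by decide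
  have hsub : part.Sublist "abcdefghijklmnopqrstuvwxyz".toList := by
    rw [hpart]
    have : ((j : Int) + 1) = ((j + 1 : Nat) : Int) := by push_cast; ring
    rw [this, PySem.List.slice_natCast]
    exact (("abcdefghijklmnopqrstuvwxyz".toList.drop i).take_sublist _).trans ("abcdefghijklmnopqrstuvwxyz".toList.drop_sublist i)
  have hpw : part.Pairwise (· < ·) := habc.sublist hsub
  have hnd : part.Nodup := hpw.imp (fun h => ne_of_lt h)
  rw [pvLoopA_eq_head_filter]
  rw [PySem.Set.ofList_eq_self_of_nodup part hnd, pvDiff_eq_filter]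
  have hmem : ∀ c : Char, (c ∈ PySem.Set.ofList txt.toList) ↔ c ∈ txt.toList := fun c =>
    PySem.Set.mem_ofList _ _
  have hfeq : part.filter (fun c => !((c ∈ PySem.Set.ofList txt.toList : Bool)))
      = part.filter (fun c => !(c ∈ txt.toList : Bool)) := by
    apply List.filter_congr
    intro c _
    simp [hmem c]
  rw [hfeq, pvMin?_sorted _ (hpw.filter _)]
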